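-- pv_equiv track=rewrite | github.com/transgen-ibm/remoteTesting | Java/code_commented/atcoder_AGC043_B.py | cal
-- ===== SOURCE A (Python) =====
-- def cal(s, c):
--     n = len(s)
--     m = n - 1
--     ans = 0
--     for i in range(n):
--         if s[i] == c and (m & i) == i:
--             ans ^= 1
--     return ans
-- ===== SOURCE B (Python) =====
-- def cal(s, c):
--     # Enumerate the submasks of m = len(s)-1 directly (sub = (sub-1) & m chain)
--     # instead of scanning every index; XOR parity of positions holding c.
--     n = len(s)
--     if n == 0:
--         return 0
--     m = n - 1
--     ans = 0
--     sub = m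
--     while True:
--         if s[sub] == c:
--             ans ^= 1
--         if sub == 0:
--             break
--         sub = (sub - 1) & m
--     return ans
-- ===== Notes on version B (the rewrite author's own statement) =====
-- stated objective: faster
-- what changed: B enumerates the submasks of n-1 directly with the classic sub=(sub-1)&m chain (guarding n==0) instead of scanning all n indices and testing the submask condition on each.
import Mathlib
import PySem

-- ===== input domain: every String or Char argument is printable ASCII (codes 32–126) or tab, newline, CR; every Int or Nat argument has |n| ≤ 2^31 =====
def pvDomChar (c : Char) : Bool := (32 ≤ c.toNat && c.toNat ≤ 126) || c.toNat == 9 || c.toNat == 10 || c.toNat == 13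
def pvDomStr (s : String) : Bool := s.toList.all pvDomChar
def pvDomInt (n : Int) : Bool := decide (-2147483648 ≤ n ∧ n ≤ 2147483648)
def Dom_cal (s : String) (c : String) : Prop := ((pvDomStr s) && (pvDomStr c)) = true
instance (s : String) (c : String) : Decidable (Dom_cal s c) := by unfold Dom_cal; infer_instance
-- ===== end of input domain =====

-- B enumerates the submasks of n-1 with the sub = (sub-1) & m chain (guarding n == 0)
-- instead of scanning all n indices and testing the submask condition on each.

-- Python `s[i] == c`: the one-character string s[i] compared with the string c.
def pyCharEqStr (o : Option Char) (c : String) : Bool :=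
  match o with
  | some ch => c.toList == [ch]
  | none => false

-- ===== PORT A =====
def cal (s : String) (c : String) : Int :=
  let n := PySem.Str.len s
  let m := n - 1
  (PySem.List.pyRange 0 n 1).foldl
    (fun ans i =>
      if pyCharEqStr (PySem.Str.pyGet? s i) c && (PySem.Int.band m i == i) then
        PySem.Int.bxor ans 1
      else ans) 0

-- ===== PORT B =====
-- the while-True loop of Source B: process sub, stop after sub = 0, else sub := (sub-1) & m
def calAltLoop (s : String) (c : String) (m : Nat) (sub : Nat) (ans : Int) : Int :=
  let ans' := if pyCharEqStr (PySem.Str.pyGet? s (sub : Int)) c then PySem.Int.bxor ans 1 else ans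
  if h : sub = 0 then ans'
  else calAltLoop s c m ((sub - 1) &&& m) ans'
termination_by sub
decreasing_by
  have h1 : (sub - 1) &&& m ≤ sub - 1 := Nat.and_le_left
  omega

def cal_alt (s : String) (c : String) : Int :=
  let n := PySem.Str.len s
  if n == 0 then 0
  else calAltLoop s c (n - 1).toNat (n - 1).toNat 0

-- ===== PRECONDITION & SPEC =====
def Spec_cal (s : String) (c : String) (out : Int) : Prop := out = cal_alt s c
instance (s : String) (c : String) (out : Int) : Decidable (Spec_cal s c out) := by unfold Spec_cal; infer_instance

-- ===== CLAIM (what is proved, stated in full; the proofs are below) =====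
def Claim_equal_cal : Prop := ∀ (s : String) (c : String), Dom_cal s c → Spec_cal s c (cal s c)

-- ===== LEMMAS AND PROOFS =====

lemma and_mod_two (x y : Nat) : (x &&& y) % 2 = min (x % 2) (y % 2) := by
  have h := @Nat.and_mod_two_eq_one x y
  rcases Nat.mod_two_eq_zero_or_one x with hx | hx <;>
  rcases Nat.mod_two_eq_zero_or_one y with hy | hy <;>
  rcases Nat.mod_two_eq_zero_or_one (x &&& y) with h2 | h2 <;>
  omega

lemma and_recon (x y : Nat) : x &&& y = 2 * (x / 2 &&& y / 2) + min (x % 2) (y % 2) := by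
  have h1 := @Nat.and_div_two x y
  have h2 := and_mod_two x y
  omega

-- key fact: any submask t of m below a positive submask x of m satisfies t ≤ (x-1) &&& m
lemma le_pred_and : ∀ x m t : Nat, x &&& m = x → t &&& m = t → 0 < x → t < x →
    t ≤ (x - 1) &&& m := by
  intro x
  induction x using Nat.strong_induction_on with
  | _ x ih =>
    intro m t hx ht hx0 htx
    have hxr := and_recon x m
    have htr := and_recon t m
    have hxd : x / 2 &&& m / 2 = x / 2 := by omega
    have htd : t / 2 &&& m / 2 = t / 2 := by omega
    have hr := and_recon (x - 1) m
    rcases Nat.mod_two_eq_zero_or_one x with hx2 | hx2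
    · have hx2' : 0 < x / 2 := by omega
      have hlt : t / 2 < x / 2 := by omega
      have hih := ih (x / 2) (by omega) (m / 2) (t / 2) hxd htd hx2' hlt
      have e1 : (x - 1) / 2 = x / 2 - 1 := by omega
      have e2 : (x - 1) % 2 = 1 := by omega
      rw [e1, e2] at hr
      have hr2 := and_recon (x / 2 - 1) (m / 2)
      omega
    · have e1 : (x - 1) / 2 = x / 2 := by omega
      have e2 : (x - 1) % 2 = 0 := by omega
      rw [e1, e2] at hr
      omega

-- the list of values visited by Source B's loop started at sub
def chain (m : Nat) (sub : Nat) : List Nat :=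
  if h : sub = 0 then [sub]
  else sub :: chain m ((sub - 1) &&& m)
termination_by sub
decreasing_by
  have h1 : (sub - 1) &&& m ≤ sub - 1 := Nat.and_le_left
  omega

lemma chain_mem_le (m : Nat) : ∀ x, x &&& m = x → ∀ t ∈ chain m x, t &&& m = t ∧ t ≤ x := by
  intro x
  induction x using Nat.strong_induction_on with
  | _ x ih =>
    intro hx t htmem
    rw [chain] at htmem
    by_cases h0 : x = 0
    · simp [h0] at htmem
      subst htmem h0; exact ⟨hx, le_refl _⟩
    · simp [h0] at htmem
      rcases htmem with rfl | htail
      · exact ⟨hx, le_refl _⟩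
      · have hlt : (x - 1) &&& m < x := by
          have := @Nat.and_le_left (x - 1) m; omega
        have hsub : ((x - 1) &&& m) &&& m = (x - 1) &&& m := Nat.and_self_right _ _
        have := ih _ hlt hsub t htail
        exact ⟨this.1, by have := this.2; have := @Nat.and_le_left (x - 1) m; omega⟩

lemma mem_chain (m : Nat) : ∀ x t, x &&& m = x → t &&& m = t → t ≤ x → t ∈ chain m x := by
  intro x
  induction x using Nat.strong_induction_on with
  | _ x ih =>
    intro t hx ht hle
    rw [chain]
    by_cases h0 : x = 0
    · subst h0; simp; omega
    · simp [h0]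
      by_cases het : t = x
      · left; exact het
      · right
        have htx : t < x := by omega
        have hlt : (x - 1) &&& m < x := by have := @Nat.and_le_left (x - 1) m; omega
        have hsub : ((x - 1) &&& m) &&& m = (x - 1) &&& m := Nat.and_self_right _ _
        exact ih _ hlt t hsub ht (le_pred_and x m t hx ht (by omega) htx)

lemma chain_pairwise (m : Nat) : ∀ x, x &&& m = x → (chain m x).Pairwise (· > ·) := by
  intro x
  induction x using Nat.strong_induction_on with
  | _ x ih =>
    intro hx
    rw [chain]
    by_cases h0 : x = 0
    · simp [h0]
    · simp only [h0, dite_false]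
      have hlt : (x - 1) &&& m < x := by have := @Nat.and_le_left (x - 1) m; omega
      have hsub : ((x - 1) &&& m) &&& m = (x - 1) &&& m := Nat.and_self_right _ _
      refine List.Pairwise.cons ?_ (ih _ hlt hsub)
      intro t htmem
      have := (chain_mem_le m _ hsub t htmem).2
      omega

lemma chain_nodup (m x : Nat) (hx : x &&& m = x) : (chain m x).Nodup :=
  (chain_pairwise m x hx).imp (fun h => Nat.ne_of_gt h)

lemma chain_perm (m : Nat) :
    List.Perm (chain m m) (List.filter (fun k => m &&& k == k) (List.range (m + 1))) := by
  apply (List.perm_ext_iff_of_nodup (chain_nodup m m (Nat.and_self m)) ?_).mpr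
  · intro t
    simp only [List.mem_filter, List.mem_range, beq_iff_eq]
    constructor
    · intro h
      have := chain_mem_le m m (Nat.and_self m) t h
      exact ⟨by omega, by rw [Nat.and_comm]; exact this.1⟩
    · intro ⟨h1, h2⟩
      have h2' : t &&& m = t := by rw [Nat.and_comm]; exact h2
      have : t ≤ m := by have := @Nat.and_le_right t m; omega
      exact mem_chain m m t (Nat.and_self m) h2' this
  · exact List.nodup_range.filter _

def pint (b : Bool) : Int := if b then 1 else 0

lemma bxor_pint (b q : Bool) :
    (if q then PySem.Int.bxor (pint b) 1 else pint b) = pint (b ^^ q) := by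
  cases b <;> cases q <;> decide

lemma foldl_xor_pint {α : Type} (q : α → Bool) :
    ∀ (xs : List α) (b : Bool),
      xs.foldl (fun a k => if q k then PySem.Int.bxor a 1 else a) (pint b)
        = pint (xs.foldl (fun pb k => pb ^^ q k) b) := by
  intro xs
  induction xs with
  | nil => intro b; rfl
  | cons x xs ih =>
    intro b
    simp only [List.foldl_cons]
    rw [bxor_pint, ih]

lemma foldl_xor_filter {α : Type} (p r : α → Bool) :
    ∀ (xs : List α) (b : Bool),
      xs.foldl (fun pb k => pb ^^ (p k && r k)) b
        = (xs.filter r).foldl (fun pb k => pb ^^ p k) b := by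
  intro xs
  induction xs with
  | nil => intro b; rfl
  | cons x xs ih =>
    intro b
    by_cases hr : r x <;> simp [hr, ih]

lemma foldl_xor_perm {α : Type} (p : α → Bool) {l₁ l₂ : List α} (h : List.Perm l₁ l₂) (b : Bool) :
    l₁.foldl (fun pb k => pb ^^ p k) b = l₂.foldl (fun pb k => pb ^^ p k) b := by
  have : RightCommutative (fun (pb : Bool) k => pb ^^ p k) := by
    constructor
    intro a x y
    cases a <;> cases p x <;> cases p y <;> simp
  exact List.Perm.foldl_eq h b

-- B's loop computes the xor-parity over the chain list
lemma calAltLoop_eq_chain (s c : String) (m : Nat) :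
    ∀ sub (b : Bool),
      calAltLoop s c m sub (pint b)
        = pint ((chain m sub).foldl
            (fun pb (k : Nat) => pb ^^ pyCharEqStr (PySem.Str.pyGet? s (k : Int)) c) b) := by
  intro sub
  induction sub using Nat.strong_induction_on with
  | _ sub ih =>
    intro b
    rw [calAltLoop, chain]
    by_cases h0 : sub = 0
    · simp only [h0, dite_true, List.foldl_cons, List.foldl_nil]
      exact bxor_pint b _
    · simp only [h0, dite_false, List.foldl_cons]
      have hlt : (sub - 1) &&& m < sub := by have := @Nat.and_le_left (sub - 1) m; omega
      rw [bxor_pint, ih _ hlt]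

theorem cal_eq_alt (s : String) (c : String) : cal s c = cal_alt s c := by
  unfold cal cal_alt
  simp only [PySem.Str.len_eq]
  by_cases h0 : s.toList.length = 0
  · simp [h0, PySem.List.pyRange_one_eq_nil]
  · -- nonempty: write M for length - 1
    have hne : ((s.toList.length : Int) == 0) = false := by
      simp only [beq_eq_false_iff_ne, ne_eq, Nat.cast_eq_zero]; exact h0
    rw [hne, if_neg (by simp)]
    have hm : ((s.toList.length : Int)) - 1 = ((s.toList.length - 1 : Nat) : Int) := by omega
    have htn : (((s.toList.length : Int)) - 1).toNat = s.toList.length - 1 := by omega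
    simp only [hm, Int.toNat_natCast]
    have hrange : PySem.List.pyRange 0 ((s.toList.length : Nat) : Int) 1
        = (List.range s.toList.length).map (fun k => ((k : Nat) : Int)) := by
      rw [PySem.List.pyRange_one]
      simp
    rw [hrange, List.foldl_map]
    have hb : ∀ k : Nat, (PySem.Int.band ((s.toList.length - 1 : Nat) : Int) ((k : Nat) : Int)
            == ((k : Nat) : Int))
          = ((s.toList.length - 1 : Nat) &&& k == k) := by
      intro k
      rw [PySem.Int.band_natCast]
      apply Bool.eq_iff_iff.mpr
      simp
    have hf : (fun (a : Int) (k : Nat) =>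
          if pyCharEqStr (PySem.Str.pyGet? s ((k : Nat) : Int)) c
              && (PySem.Int.band ((s.toList.length - 1 : Nat) : Int) ((k : Nat) : Int)
                    == ((k : Nat) : Int)) then
            PySem.Int.bxor a 1
          else a)
        = (fun (a : Int) (k : Nat) =>
          if (fun j => pyCharEqStr (PySem.Str.pyGet? s ((j : Nat) : Int)) c
                && ((s.toList.length - 1 : Nat) &&& j == j)) k then
            PySem.Int.bxor a 1
          else a) := by
      funext a k
      rw [hb k]
    rw [hf]
    have hA := foldl_xor_pint
      (fun j => pyCharEqStr (PySem.Str.pyGet? s ((j : Nat) : Int)) c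
        && ((s.toList.length - 1 : Nat) &&& j == j))
      (List.range s.toList.length) false
    have hB := calAltLoop_eq_chain s c (s.toList.length - 1) (s.toList.length - 1) false
    simp only [pint, Bool.false_eq_true, if_false] at hA hB
    rw [hA, hB]
    have hperm := chain_perm (s.toList.length - 1)
    have hsucc : s.toList.length - 1 + 1 = s.toList.length := by omega
    rw [hsucc] at hperm
    rw [foldl_xor_filter,
      ← foldl_xor_perm (fun k : Nat => pyCharEqStr (PySem.Str.pyGet? s (k : Int)) c) hperm false]

-- ===== VERDICT (by name: the statement is the Claim_ definition above) =====
theorem cal_spec : Claim_equal_cal := by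
  intro s c _
  exact cal_eq_alt s c
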